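-- pv_equiv track=rewrite | github.com/Smayxor/stock | signals.py | findPeaksAndValleys
-- ===== SOURCE A (Python) =====
-- def findPeaksAndValleys( prices ):
-- 	lenavgs = len( prices )
-- 	highs = []
-- 	lows = []
-- 	last = prices[0]
-- 	high = 0
-- 	low = 0
-- 	def checkNextHigh(index):
-- 		#last = index + 30 if index + 30 < lenavgs else lenavgs
-- 		last = index + 50
-- 		if last > lenavgs : return False
-- 		for i in range(index, last):
-- 			if prices[i] > prices[index] : return False
-- 		return True
-- 	def checkNextLow(index):
-- 		#last = index + 30 if index + 30 < lenavgs else lenavgs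
-- 		last = index + 50
-- 		if last > lenavgs : return False
-- 		for i in range(index, last):
-- 			if prices[i] < prices[index] : return False
-- 		return True
--
-- 	for i in range( 1, lenavgs ) :
-- 		if prices[i] > prices[high] and checkNextHigh(i):
-- 			highs.append(i)
-- 			high = i
-- 			low = i
-- 		elif prices[i] < prices[low] and checkNextLow(i):
-- 			lows.append(i)
-- 			low = i
-- 			high = i
-- 		else:
-- 			pass
-- 	return (lows, highs)
-- ===== SOURCE B (Python) =====
-- def _nextIdx(prices, better):
--     # for each i, the smallest j > i with better(prices[j], prices[i]); n if none.
--     # right-to-left monotonic stack: amortized O(n).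
--     n = len(prices)
--     res = [n] * n
--     stack = []
--     for i in range(n - 1, -1, -1):
--         while stack and not better(prices[stack[-1]], prices[i]):
--             stack.pop()
--         res[i] = stack[-1] if stack else n
--         stack.append(i)
--     return res
--
-- def findPeaksAndValleys(prices):
--     n = len(prices)
--     ng = _nextIdx(prices, lambda x, y: x > y)
--     ns = _nextIdx(prices, lambda x, y: x < y)
--     highs = []
--     lows = []
--     high = 0
--     low = 0
--     for i in range(1, n):
--         if prices[i] > prices[high] and i + 50 <= n and ng[i] >= i + 50:
--             highs.append(i)
--             high = i
--             low = i
--         elif prices[i] < prices[low] and i + 50 <= n and ns[i] >= i + 50: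
--             lows.append(i)
--             low = i
--             high = i
--     return (lows, highs)
-- ===== Notes on version B (the rewrite author's own statement) =====
-- stated objective: alternative
-- what changed: A re-scans a 50-element forward window for every candidate index (worst case O(n*w)); B precomputes, with a right-to-left monotonic stack, for every index the next index holding a strictly greater (resp. smaller) value, then runs the sequential high/low state pass consulting those arrays in O(1) per index, O(n) total.
import Mathlib
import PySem

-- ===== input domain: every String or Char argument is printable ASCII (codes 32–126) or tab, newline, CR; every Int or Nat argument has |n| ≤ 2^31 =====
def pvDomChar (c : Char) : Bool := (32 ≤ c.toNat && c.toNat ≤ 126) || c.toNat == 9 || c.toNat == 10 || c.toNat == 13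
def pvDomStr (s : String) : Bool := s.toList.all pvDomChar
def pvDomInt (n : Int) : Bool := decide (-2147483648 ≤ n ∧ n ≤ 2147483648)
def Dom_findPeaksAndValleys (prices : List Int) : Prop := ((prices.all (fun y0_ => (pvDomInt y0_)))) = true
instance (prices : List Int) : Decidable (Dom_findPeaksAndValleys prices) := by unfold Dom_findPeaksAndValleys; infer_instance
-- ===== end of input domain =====

-- B replaces A's 50-element forward re-scan per candidate with precomputed next-greater/next-smaller
-- index arrays built by a right-to-left monotonic stack (alternative algorithm, not measured faster).
-- A raises IndexError on [] (it reads prices[0]); B (and its port) returns ([], []) there.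

-- shared indexing helper: prices[i] for an in-range index (Python list indexing)
def pvGet (a : List Int) (i : Int) : Int := PySem.List.pyGetD a i 0

-- ===== PORT A =====
-- the inner loop of checkNextHigh: 'for i in range(index, last): if prices[i] > prices[index]: return False'
def pvScanHigh (a : List Int) (idx : Int) : List Int → Bool
  | [] => true
  | j :: r => if pvGet a j > pvGet a idx then false else pvScanHigh a idx r

def pvScanLow (a : List Int) (idx : Int) : List Int → Bool
  | [] => true
  | j :: r => if pvGet a j < pvGet a idx then false else pvScanLow a idx r

def pvCheckNextHigh (a : List Int) (index : Int) : Bool :=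
  let lastN := index + 50
  if lastN > (a.length : Int) then false
  else pvScanHigh a index (PySem.List.pyRange index lastN 1)

def pvCheckNextLow (a : List Int) (index : Int) : Bool :=
  let lastN := index + 50
  if lastN > (a.length : Int) then false
  else pvScanLow a index (PySem.List.pyRange index lastN 1)

-- state: (highs, lows, high, low)
def pvAStep (a : List Int) : (List Int × List Int × Int × Int) → Int → (List Int × List Int × Int × Int)
  | (highs, lows, high, low), i =>
    if decide (pvGet a i > pvGet a high) && pvCheckNextHigh a i then
      (highs ++ [i], lows, i, i)
    else if decide (pvGet a i < pvGet a low) && pvCheckNextLow a i then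
      (highs, lows ++ [i], i, i)
    else (highs, lows, high, low)

def findPeaksAndValleys (prices : List Int) : List Int × List Int :=
  let lenavgs : Int := (prices.length : Int)
  -- 'last = prices[0]' raises IndexError on []; excluded by Pre_ (the binding is otherwise unused)
  let r := (PySem.List.pyRange 1 lenavgs 1).foldl (pvAStep prices) ([], [], 0, 0)
  (r.2.1, r.1)

-- ===== PORT B =====
-- 'while stack and not better(prices[stack[-1]], prices[i]): stack.pop()'  (stack head = top)
def pvPopWhile (p : Int → Bool) : List Int → List Int
  | [] => []
  | j :: r => if p j then pvPopWhile p r else j :: r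

-- the right-to-left loop of _nextIdx; m counts how many trailing indices have been processed
def pvNextAux (a : List Int) (gt : Int → Int → Bool) (n : Nat) : Nat → List Int × List Int
  | 0 => ([], [])
  | m + 1 =>
    let pr := pvNextAux a gt n m
    let i : Int := (n : Int) - (m + 1)
    let st := pvPopWhile (fun j => !(gt (pvGet a j) (pvGet a i))) pr.2
    let v : Int := match st with | [] => (n : Int) | j :: _ => j
    (v :: pr.1, i :: st)

def pvNextIdx (a : List Int) (gt : Int → Int → Bool) : List Int :=
  (pvNextAux a gt a.length a.length).1

def pvBStep (a ng ns : List Int) : (List Int × List Int × Int × Int) → Int → (List Int × List Int × Int × Int)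
  | (highs, lows, high, low), i =>
    if decide (pvGet a i > pvGet a high) && (decide (i + 50 ≤ (a.length : Int)) && decide (pvGet ng i ≥ i + 50)) then
      (highs ++ [i], lows, i, i)
    else if decide (pvGet a i < pvGet a low) && (decide (i + 50 ≤ (a.length : Int)) && decide (pvGet ns i ≥ i + 50)) then
      (highs, lows ++ [i], i, i)
    else (highs, lows, high, low)

def findPeaksAndValleys_alt (prices : List Int) : List Int × List Int :=
  let n : Int := (prices.length : Int)
  let ng := pvNextIdx prices (fun x y => decide (x > y))
  let ns := pvNextIdx prices (fun x y => decide (x < y))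
  let r := (PySem.List.pyRange 1 n 1).foldl (pvBStep prices ng ns) ([], [], 0, 0)
  (r.2.1, r.1)

-- ===== PRECONDITION & SPEC =====
-- Pre_ excludes only the empty list, on which A raises IndexError at 'last = prices[0]'.
def Pre_findPeaksAndValleys (prices : List Int) : Prop := prices ≠ []
instance (prices : List Int) : Decidable (Pre_findPeaksAndValleys prices) := by
  unfold Pre_findPeaksAndValleys; infer_instance
def pvWitness_findPeaksAndValleys : List Int := [0]

def Spec_findPeaksAndValleys (prices : List Int) (out : List Int × List Int) : Prop :=
  out = findPeaksAndValleys_alt prices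
instance (prices : List Int) (out : List Int × List Int) : Decidable (Spec_findPeaksAndValleys prices out) := by
  unfold Spec_findPeaksAndValleys; infer_instance

-- ===== CLAIM (what is proved, stated in full; the proofs are below) =====
def Claim_equal_findPeaksAndValleys : Prop :=
  ∀ (prices : List Int), Dom_findPeaksAndValleys prices → Pre_findPeaksAndValleys prices →
    Spec_findPeaksAndValleys prices (findPeaksAndValleys prices)

-- ===== LEMMAS AND PROOFS =====

-- proof-side characterisations of B's stack pass
-- the value _nextIdx stores at i: first j > i with gt a[j] a[i], else n
def pvNextSpec (a : List Int) (gt : Int → Int → Bool) (i : Int) : Int :=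
  ((PySem.List.pyRange (i + 1) (a.length : Int) 1).find?
      (fun j => gt (pvGet a j) (pvGet a i))).getD (a.length : Int)

-- j survives on the stack after indices ≥ s have been processed
def pvIsRec (a : List Int) (gt : Int → Int → Bool) (s j : Int) : Bool :=
  (PySem.List.pyRange s j 1).all (fun k => gt (pvGet a j) (pvGet a k))

def pvStackSpec (a : List Int) (gt : Int → Int → Bool) (s : Int) : List Int :=
  (PySem.List.pyRange s (a.length : Int) 1).filter (pvIsRec a gt s)

theorem pvPopWhile_eq_filter (p : Int → Bool) (l : List Int)
    (h : l.Pairwise (fun x y => p x = false → p y = false)) :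
    pvPopWhile p l = l.filter (fun x => !p x) := by
  induction l with
  | nil => rfl
  | cons j r ih =>
    rcases List.pairwise_cons.mp h with ⟨hhead, htail⟩
    by_cases hj : p j = true
    · simp [pvPopWhile, hj, ih htail]
    · have hj2 : p j = false := by simpa using hj
      have hall : ∀ y ∈ r, (!p y) = true := fun y hy => by simp [hhead y hy hj2]
      simp [pvPopWhile, hj2, List.filter_eq_self.mpr hall]

theorem pvFind?_pyRange_min (q : Int → Bool) (s n j : Int)
    (h : (PySem.List.pyRange s n 1).find? q = some j) :
    s ≤ j ∧ j < n ∧ q j = true ∧ ∀ k, s ≤ k → k < j → q k = false := by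
  have H : ∀ (m : Nat) (s : Int), (n - s).toNat ≤ m →
      (PySem.List.pyRange s n 1).find? q = some j →
      s ≤ j ∧ j < n ∧ q j = true ∧ ∀ k, s ≤ k → k < j → q k = false := by
    intro m
    induction m with
    | zero =>
      intro s hs hf
      rw [PySem.List.pyRange_one_eq_nil (by omega)] at hf
      simp at hf
    | succ m ih =>
      intro s hs hf
      by_cases hlt : s < n
      · rw [PySem.List.pyRange_one_cons hlt] at hf
        by_cases hq : q s = true
        · rw [List.find?_cons_of_pos hq] at hf
          obtain rfl : s = j := by simpa using hf
          exact ⟨le_rfl, hlt, hq, fun k hk1 hk2 => absurd hk1 (by omega)⟩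
        · have hq2 : q s = false := by simpa using hq
          rw [List.find?_cons_of_neg (by simp [hq2])] at hf
          obtain ⟨h1, h2, h3, h4⟩ := ih (s + 1) (by omega) hf
          refine ⟨by omega, h2, h3, fun k hk1 hk2 => ?_⟩
          rcases eq_or_lt_of_le hk1 with rfl | hk
          · exact hq2
          · exact h4 k (by omega) hk2
      · rw [PySem.List.pyRange_one_eq_nil (by omega)] at hf
        simp at hf
  exact H (n - s).toNat s le_rfl h

theorem pvFirst_filter_eq_find (l : List Int) (q r : Int → Bool)
    (h : ∀ x, l.find? q = some x → r x = true) :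
    (l.filter (fun x => r x && q x)).head? = l.find? q := by
  induction l with
  | nil => rfl
  | cons x l ih =>
    by_cases hq : q x = true
    · have hr : r x = true := h x (by rw [List.find?_cons_of_pos hq])
      simp [hr, hq, List.find?_cons_of_pos hq]
    · have hq2 : q x = false := by simpa using hq
      have h2 : ∀ y, l.find? q = some y → r y = true := fun y hy =>
        h y (by rw [List.find?_cons_of_neg (by simp [hq2])]; exact hy)
      simpa [List.filter_cons, hq2, List.find?_cons_of_neg (by simp [hq2] : ¬ q x = true)] using ih h2

theorem pvNextAux_eq (a : List Int) (gt : Int → Int → Bool)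
    (hP : ∀ x y z, gt x y = true → gt z y = false → gt x z = true)
    (hT : ∀ x y z, gt x y = true → gt y z = true → gt x z = true)
    (m : Nat) (hm : m ≤ a.length) :
    pvNextAux a gt a.length m =
      ((PySem.List.pyRange ((a.length : Int) - m) (a.length : Int) 1).map (pvNextSpec a gt),
        pvStackSpec a gt ((a.length : Int) - m)) := by
  induction m with
  | zero =>
    simp [pvNextAux, pvStackSpec, PySem.List.pyRange_one_eq_nil (le_refl (a.length : Int))]
  | succ m ih =>
    have hm' : m ≤ a.length := by omega
    set N : Int := (a.length : Int) with hN
    set i : Int := N - (m + 1) with hi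
    have hiN : i < N := by omega
    have hi0 : 0 ≤ i := by omega
    have hs : N - (m : Int) = i + 1 := by push_cast [hi]; ring
    set q : Int → Bool := fun j => gt (pvGet a j) (pvGet a i) with hq
    set p : Int → Bool := fun j => !(gt (pvGet a j) (pvGet a i)) with hp
    -- once an element of the stack beats a[i], so does every later (deeper) one
    have pw : (pvStackSpec a gt (i + 1)).Pairwise (fun x y => p x = false → p y = false) := by
      refine List.Pairwise.imp_of_mem ?_
        (List.Pairwise.filter _ (PySem.List.pairwise_lt_pyRange_one (i + 1) N))
      intro x y hx hy hxy hpx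
      have hgx : gt (pvGet a x) (pvGet a i) = true := by
        simpa [hp] using hpx
      have hx' := List.mem_filter.mp hx
      have hy' := List.mem_filter.mp hy
      have hxr := PySem.List.mem_pyRange_one.mp hx'.1
      have hyx : gt (pvGet a y) (pvGet a x) = true := by
        have := (List.all_eq_true.mp hy'.2) x
          (PySem.List.mem_pyRange_one.mpr ⟨hxr.1, hxy⟩)
        simpa using this
      simp [hp, hT _ _ _ hyx hgx]
    -- the value stored for i is the first strictly-beating index
    have hfind : ∀ x, (PySem.List.pyRange (i + 1) N 1).find? q = some x →
        pvIsRec a gt (i + 1) x = true := by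
      intro x hx
      obtain ⟨h1, h2, h3, h4⟩ := pvFind?_pyRange_min q (i + 1) N x hx
      refine List.all_eq_true.mpr fun k hk => ?_
      have hkr := PySem.List.mem_pyRange_one.mp hk
      exact hP _ _ _ h3 (h4 k hkr.1 hkr.2)
    have hpop : pvPopWhile p (pvStackSpec a gt (i + 1)) =
        (PySem.List.pyRange (i + 1) N 1).filter (fun j => pvIsRec a gt (i + 1) j && q j) := by
      rw [pvPopWhile_eq_filter p _ pw, pvStackSpec, List.filter_filter]
      refine List.filter_congr fun j _ => ?_
      simp [hp, hq, Bool.and_comm]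
    have hhead : ((PySem.List.pyRange (i + 1) N 1).filter
          (fun j => pvIsRec a gt (i + 1) j && q j)).head? =
        (PySem.List.pyRange (i + 1) N 1).find? q :=
      pvFirst_filter_eq_find _ q _ hfind
    have hstack : (i :: (PySem.List.pyRange (i + 1) N 1).filter
          (fun j => pvIsRec a gt (i + 1) j && q j)) = pvStackSpec a gt i := by
      rw [pvStackSpec, PySem.List.pyRange_one_cons hiN, List.filter_cons]
      have hii : pvIsRec a gt i i = true := by
        simp [pvIsRec, PySem.List.pyRange_one_eq_nil (le_refl i)]
      rw [if_pos (by simp [hii])]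
      congr 1
      refine List.filter_congr fun j hj => ?_
      have hjr := PySem.List.mem_pyRange_one.mp hj
      conv_rhs => rw [pvIsRec, PySem.List.pyRange_one_cons (by omega : i < j), List.all_cons]
      exact Bool.and_comm _ _
    have hv : (match (PySem.List.pyRange (i + 1) N 1).filter
          (fun j => pvIsRec a gt (i + 1) j && q j) with
        | [] => N | j :: _ => j) = pvNextSpec a gt i := by
      rw [pvNextSpec, ← hN]
      rcases hcase : (PySem.List.pyRange (i + 1) N 1).filter
          (fun j => pvIsRec a gt (i + 1) j && q j) with _ | ⟨x, rest⟩
      · have hfn : (PySem.List.pyRange (i + 1) N 1).find? q = none := by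
          rw [← hhead, hcase]; rfl
        rw [← hq, hfn]
        rfl
      · have hfs : (PySem.List.pyRange (i + 1) N 1).find? q = some x := by
          rw [← hhead, hcase]; rfl
        rw [← hq, hfs]
        rfl
    show pvNextAux a gt a.length (m + 1) = _
    rw [pvNextAux, ih hm', hs]
    simp only [Nat.cast_add, Nat.cast_one, ← hN, ← hi, ← hp]
    rw [hpop, hv, hstack, PySem.List.pyRange_one_cons hiN, List.map_cons]

theorem pvNextIdx_get (a : List Int) (gt : Int → Int → Bool)
    (hP : ∀ x y z, gt x y = true → gt z y = false → gt x z = true)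
    (hT : ∀ x y z, gt x y = true → gt y z = true → gt x z = true)
    (i : Int) (h0 : 0 ≤ i) (hn : i < (a.length : Int)) :
    pvGet (pvNextIdx a gt) i = pvNextSpec a gt i := by
  unfold pvNextIdx pvGet
  rw [pvNextAux_eq a gt hP hT a.length le_rfl]
  simp only [sub_self]
  exact PySem.List.pyGetD_map_pyRange_of_nonneg _ _ _ _ h0 hn

-- A's window check in terms of pvNextSpec
theorem pvCond_eq (a : List Int) (gt : Int → Int → Bool)
    (hIrr : ∀ x, gt x x = false) (i : Int) :
    ((if i + 50 > (a.length : Int) then false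
      else (PySem.List.pyRange i (i + 50) 1).all (fun j => !(gt (pvGet a j) (pvGet a i)))) =
      (decide (i + 50 ≤ (a.length : Int)) && decide (pvNextSpec a gt i ≥ i + 50))) := by
  by_cases hb : i + 50 > (a.length : Int)
  · simp [hb, show ¬ (i + 50 ≤ (a.length : Int)) by omega]
  · have hb2 : i + 50 ≤ (a.length : Int) := by omega
    rw [if_neg hb]
    rw [show decide (i + 50 ≤ (a.length : Int)) = true by simpa using hb2, Bool.true_and]
    rcases hf : (PySem.List.pyRange (i + 1) ((a.length : Int)) 1).find?
        (fun j => gt (pvGet a j) (pvGet a i)) with _ | x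
    · have hnone := List.find?_eq_none.mp hf
      have hall : ∀ j ∈ PySem.List.pyRange i (i + 50) 1,
          (!(gt (pvGet a j) (pvGet a i))) = true := by
        intro j hj
        have hjr := PySem.List.mem_pyRange_one.mp hj
        rcases eq_or_lt_of_le hjr.1 with rfl | hlt
        · simp [hIrr]
        · have := hnone j (PySem.List.mem_pyRange_one.mpr ⟨by omega, by omega⟩)
          simpa using this
      rw [List.all_eq_true.mpr hall]
      have hns : pvNextSpec a gt i = (a.length : Int) := by rw [pvNextSpec, hf]; rfl
      have h5 : pvNextSpec a gt i ≥ i + 50 := by rw [hns]; omega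
      simp [h5]
    · obtain ⟨h1, h2, h3, h4⟩ := pvFind?_pyRange_min _ _ _ _ hf
      have hns : pvNextSpec a gt i = x := by rw [pvNextSpec, hf]; rfl
      by_cases hx : i + 50 ≤ x
      · have hall : ∀ j ∈ PySem.List.pyRange i (i + 50) 1,
            (!(gt (pvGet a j) (pvGet a i))) = true := by
          intro j hj
          have hjr := PySem.List.mem_pyRange_one.mp hj
          rcases eq_or_lt_of_le hjr.1 with rfl | hlt
          · simp [hIrr]
          · simp [h4 j (by omega) (by omega)]
        rw [List.all_eq_true.mpr hall]
        have h5 : pvNextSpec a gt i ≥ i + 50 := by rw [hns]; omega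
        simp [h5]
      · have hmem : x ∈ PySem.List.pyRange i (i + 50) 1 :=
          PySem.List.mem_pyRange_one.mpr ⟨by omega, by omega⟩
        have hfalse : (PySem.List.pyRange i (i + 50) 1).all
            (fun j => !(gt (pvGet a j) (pvGet a i))) = false := by
          refine Bool.eq_false_iff.mpr fun hall => ?_
          have := List.all_eq_true.mp hall x hmem
          simp [h3] at this
        rw [hfalse]
        have h5 : ¬ (pvNextSpec a gt i ≥ i + 50) := by rw [hns]; omega
        simp [h5]

theorem pvScanHigh_eq_all (a : List Int) (idx : Int) (l : List Int) :
    pvScanHigh a idx l = l.all (fun j => !(decide (pvGet a j > pvGet a idx))) := by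
  induction l with
  | nil => rfl
  | cons j r ih =>
    by_cases hj : pvGet a j > pvGet a idx
    · simp [pvScanHigh, hj]
    · simp [pvScanHigh, hj, ih]

theorem pvScanLow_eq_all (a : List Int) (idx : Int) (l : List Int) :
    pvScanLow a idx l = l.all (fun j => !(decide (pvGet a j < pvGet a idx))) := by
  induction l with
  | nil => rfl
  | cons j r ih =>
    by_cases hj : pvGet a j < pvGet a idx
    · simp [pvScanLow, hj]
    · simp [pvScanLow, hj, ih]

theorem pvStep_eq (a : List Int) (s : List Int × List Int × Int × Int) (i : Int) (h0 : 0 < i)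
    (hn : i < (a.length : Int)) :
    pvAStep a s i = pvBStep a (pvNextIdx a (fun x y => decide (x > y)))
      (pvNextIdx a (fun x y => decide (x < y))) s i := by
  have hIrrG : ∀ x : Int, (fun x y => decide (x > y)) x x = false := by intro x; simp
  have hPG : ∀ x y z : Int, (fun x y => decide (x > y)) x y = true →
      (fun x y => decide (x > y)) z y = false → (fun x y => decide (x > y)) x z = true := by
    intro x y z h1 h2; simp at h1 h2 ⊢; omega
  have hTG : ∀ x y z : Int, (fun x y => decide (x > y)) x y = true →
      (fun x y => decide (x > y)) y z = true → (fun x y => decide (x > y)) x z = true := by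
    intro x y z h1 h2; simp at h1 h2 ⊢; omega
  have hIrrL : ∀ x : Int, (fun x y => decide (x < y)) x x = false := by intro x; simp
  have hPL : ∀ x y z : Int, (fun x y => decide (x < y)) x y = true →
      (fun x y => decide (x < y)) z y = false → (fun x y => decide (x < y)) x z = true := by
    intro x y z h1 h2; simp at h1 h2 ⊢; omega
  have hTL : ∀ x y z : Int, (fun x y => decide (x < y)) x y = true →
      (fun x y => decide (x < y)) y z = true → (fun x y => decide (x < y)) x z = true := by
    intro x y z h1 h2; simp at h1 h2 ⊢; omega
  have hH : pvCheckNextHigh a i = (decide (i + 50 ≤ (a.length : Int)) &&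
      decide (pvGet (pvNextIdx a (fun x y => decide (x > y))) i ≥ i + 50)) := by
    have hc := pvCond_eq a (fun x y => decide (x > y)) hIrrG i
    beta_reduce at hc
    rw [pvCheckNextHigh]
    rw [pvScanHigh_eq_all, hc,
      pvNextIdx_get a _ hPG hTG i (by omega) hn]
  have hL : pvCheckNextLow a i = (decide (i + 50 ≤ (a.length : Int)) &&
      decide (pvGet (pvNextIdx a (fun x y => decide (x < y))) i ≥ i + 50)) := by
    have hc := pvCond_eq a (fun x y => decide (x < y)) hIrrL i
    beta_reduce at hc
    rw [pvCheckNextLow]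
    rw [pvScanLow_eq_all, hc,
      pvNextIdx_get a _ hPL hTL i (by omega) hn]
  obtain ⟨highs, lows, high, low⟩ := s
  simp only [pvAStep, pvBStep, hH, hL]

-- ===== VERDICT (by name: the statement is the Claim_ definition above) =====
theorem findPeaksAndValleys_spec : Claim_equal_findPeaksAndValleys := by
  intro prices _ _
  simp only [Spec_findPeaksAndValleys, findPeaksAndValleys, findPeaksAndValleys_alt]
  rw [PySem.List.foldl_congr_mem' (PySem.List.pyRange 1 ((prices.length : Int)) 1)
    (pvAStep prices)
    (pvBStep prices (pvNextIdx prices (fun x y => decide (x > y)))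
      (pvNextIdx prices (fun x y => decide (x < y)))) ([], [], 0, 0)
    (fun x hx acc => by
      have hxr := PySem.List.mem_pyRange_one.mp hx
      exact pvStep_eq prices acc x (by omega) hxr.2)]
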